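-- pv_equiv track=rewrite | github.com/formermagic/git-t5 | git_t5/utils/common.py | stack_mappings
-- ===== SOURCE A (Python) =====
-- from collections import defaultdict
-- from typing import Dict, List, Optional, Tuple, TypeVar
--
-- K = TypeVar("K")
--
-- T = TypeVar("T")
--
-- def stack_mappings(mappings: List[Dict[K, T]]) -> Dict[K, List[T]]:
--     def flatten(sequence: List[List[T]]) -> List[T]:
--         return [item for subsequence in sequence for item in subsequence]
--
--     result = defaultdict(list)
--     keys = set(flatten([mapping.keys() for mapping in mappings]))  # type: ignore
--     for mapping in mappings:
--         for key in keys: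
--             result[key].append(mapping.get(key, None))
--
--     return dict(result)
-- ===== SOURCE B (Python) =====
-- from typing import Dict, List, TypeVar
--
-- K = TypeVar("K")
-- T = TypeVar("T")
--
--
-- def stack_mappings(mappings: List[Dict[K, T]]) -> Dict[K, List[T]]:
--     keys = set(key for mapping in mappings for key in mapping.keys())
--     n = len(mappings)
--     result = {key: [None] * n for key in keys}
--     for i, mapping in enumerate(mappings):
--         for key, value in mapping.items():
--             result[key][i] = value
--     return result
-- ===== Notes on version B (the rewrite author's own statement) =====
-- stated objective: faster
-- what changed: Instead of probing every key in every mapping (appending mapping.get(key, None) for each key of the full key set), B preallocates a [None]*len(mappings) slot list per key and scatters only the present items of each mapping into their fixed positions.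
import Mathlib
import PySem

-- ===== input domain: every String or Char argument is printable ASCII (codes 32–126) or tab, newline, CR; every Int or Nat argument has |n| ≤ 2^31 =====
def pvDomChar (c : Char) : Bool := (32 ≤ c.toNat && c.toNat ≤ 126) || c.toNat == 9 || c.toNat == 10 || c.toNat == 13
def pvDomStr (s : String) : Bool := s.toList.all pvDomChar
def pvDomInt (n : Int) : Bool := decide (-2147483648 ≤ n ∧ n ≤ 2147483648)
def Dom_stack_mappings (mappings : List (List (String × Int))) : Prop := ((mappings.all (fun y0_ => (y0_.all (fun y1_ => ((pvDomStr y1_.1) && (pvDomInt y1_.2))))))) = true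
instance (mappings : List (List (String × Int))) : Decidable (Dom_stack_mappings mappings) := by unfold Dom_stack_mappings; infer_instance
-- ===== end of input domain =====

-- B replaces A's probe-every-key-in-every-mapping loop by preallocated [None]*n slot lists filled
-- with only the items actually present in each mapping (a different, scatter-based algorithm).
-- Output dicts are compared as Python dicts (key order immaterial); both ports realise the key set
-- in first-occurrence order. Each Python dict argument arrives as its association list and is
-- rebuilt with PySem.Dict.ofList (Python dict(pairs) semantics) at the point of use.

-- ===== PORT A =====
-- flatten(sequence) = [item for subsequence in sequence for item in subsequence]
def pyFlatten {α : Type} (sequence : List (List α)) : List α :=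
  sequence.flatMap (fun subsequence => subsequence)

def stack_mappings (mappings : List (List (String × Int))) : List (String × List (Option Int)) :=
  -- keys = set(flatten([mapping.keys() for mapping in mappings]))
  let keys : PySem.Set String :=
    PySem.Set.ofList (pyFlatten (mappings.map (fun mapping => (PySem.Dict.ofList mapping).keys)))
  -- result = defaultdict(list); for mapping in mappings: for key in keys: result[key].append(mapping.get(key, None))
  let result : PySem.Dict String (List (Option Int)) :=
    mappings.foldl (fun result mapping =>
      keys.foldl (fun result key =>
        result.modify key [] (fun l => l ++ [(PySem.Dict.ofList mapping).get? key])) result)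
      PySem.Dict.empty
  -- return dict(result)
  result.items

-- ===== PORT B =====
def stack_mappings_alt (mappings : List (List (String × Int))) : List (String × List (Option Int)) :=
  -- keys = set(key for mapping in mappings for key in mapping.keys())
  let keys : PySem.Set String :=
    PySem.Set.ofList (mappings.flatMap (fun mapping => (PySem.Dict.ofList mapping).keys))
  -- n = len(mappings)
  let n := mappings.length
  -- result = {key: [None] * n for key in keys}
  let result0 : PySem.Dict String (List (Option Int)) :=
    keys.foldl (fun d key => d.insert key (List.replicate n none)) PySem.Dict.empty
  -- for i, mapping in enumerate(mappings): for key, value in mapping.items(): result[key][i] = value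
  -- (enumerate indices are exactly 0..n-1, all nonnegative, so List.zipIdx is an exact port)
  let result : PySem.Dict String (List (Option Int)) :=
    (mappings.zipIdx).foldl (fun d p =>
      (PySem.Dict.ofList p.1).items.foldl (fun d kv =>
        d.modify kv.1 [] (fun l => l.set p.2 (some kv.2))) d) result0
  result.items

-- ===== PRECONDITION & SPEC =====
def Spec_stack_mappings (mappings : List (List (String × Int))) (out : List (String × List (Option Int))) : Prop := out = stack_mappings_alt mappings
instance (mappings : List (List (String × Int))) (out : List (String × List (Option Int))) : Decidable (Spec_stack_mappings mappings out) := by unfold Spec_stack_mappings; infer_instance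

-- ===== CLAIM (what is proved, stated in full; the proofs are below) =====
def Claim_equal_stack_mappings : Prop := ∀ (mappings : List (List (String × Int))), Dom_stack_mappings mappings → Spec_stack_mappings mappings (stack_mappings mappings)

-- ===== LEMMAS AND PROOFS =====

def pvGet (m : List (String × Int)) (k : String) : Option Int :=
  (PySem.Dict.ofList m).get? k
def pvKeys (mappings : List (List (String × Int))) : List String :=
  PySem.Set.ofList (mappings.flatMap (fun m => (PySem.Dict.ofList m).keys))
def pvCanon (mappings : List (List (String × Int))) : List (String × List (Option Int)) :=
  (pvKeys mappings).map (fun k => (k, mappings.map (fun m => pvGet m k)))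

theorem pv_update_nil {ks : List String} (h : ks.Nodup) :
    PySem.Set.update ([] : PySem.Set String) ks = ks := by
  have gen : ∀ (ks : List String) (s : List String), ks.Nodup → (∀ x ∈ ks, x ∉ s) →
      PySem.Set.update (s : PySem.Set String) ks = s ++ ks := by
    intro ks
    induction ks with
    | nil => intro s _ _; simp [PySem.Set.update]
    | cons a t ih =>
      intro s hnd hdis
      simp only [PySem.Set.update, List.foldl_cons]
      have hc : (PySem.Set.add s a) = s ++ [a] := by
        have hna : a ∉ s := hdis a (by simp)
        simp [PySem.Set.add, hna]
      rw [hc]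
      have := ih (s ++ [a]) hnd.of_cons ?_
      · simpa [PySem.Set.update, List.append_assoc] using this
      · intro x hx
        simp only [List.mem_append, List.mem_singleton]
        rintro (hxs | rfl)
        · exact hdis x (by simp [hx]) hxs
        · exact (List.nodup_cons.mp hnd).1 hx
  simpa using gen ks [] h (by simp)

theorem pv_update_self {s : PySem.Set String} {ks : List String} (h : ∀ x ∈ ks, x ∈ s) :
    PySem.Set.update s ks = s := by
  induction ks with
  | nil => simp [PySem.Set.update]
  | cons a t ih =>
    simp only [PySem.Set.update, List.foldl_cons] at *
    have hc : PySem.Set.add s a = s := by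
      have : a ∈ s := h a (by simp)
      simp [PySem.Set.add, this]
    rw [hc]
    exact ih (fun x hx => h x (by simp [hx]))

theorem pv_get?_eq_some_getD {d : PySem.Dict String (List (Option Int))} {k : String}
    (h : k ∈ d.keys) : d.get? k = some (d.getD k []) := by
  have hc : d.contains k = true := (PySem.Dict.contains_iff_mem_keys d k).mpr h
  rw [PySem.Dict.contains_eq_isSome_get?] at hc
  obtain ⟨v, hv⟩ := Option.isSome_iff_exists.mp hc
  rw [hv, PySem.Dict.getD_eq_get?_getD, hv]; rfl

theorem pv_items_char (its : List (String × List (Option Int))) (ks : List String)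
    (f : String → List (Option Int))
    (hkeys : its.map Prod.fst = ks) (hnd : ks.Nodup)
    (hget : ∀ k ∈ ks, (PySem.Dict.mk its).get? k = some (f k)) :
    its = ks.map (fun k => (k, f k)) := by
  induction its generalizing ks with
  | nil => subst hkeys; simp
  | cons p t ih =>
    obtain ⟨a, b⟩ := p
    subst hkeys
    simp only [List.map_cons, List.cons.injEq]
    have hga : (PySem.Dict.mk ((a, b) :: t)).get? a = some b := by
      simp [PySem.Dict.get?, List.find?]
    have hfa : f a = b := by
      have := hget a (by simp)
      rw [hga] at this; exact (Option.some.injEq _ _ ▸ this.symm)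
    constructor
    · simp [hfa]
    · apply ih (t.map Prod.fst) rfl (by simpa using hnd.of_cons)
      intro k hk
      have hka : k ≠ a := by
        rintro rfl; exact (List.nodup_cons.mp (by simpa using hnd)).1 hk
      have : (PySem.Dict.mk ((a, b) :: t)).get? k = (PySem.Dict.mk t).get? k := by
        have hba : (a == k) = false := beq_eq_false_iff_ne.mpr (Ne.symm hka)
        simp [PySem.Dict.get?, List.find?, hba]
      rw [← this]; exact hget k (by simp [hk])

theorem pv_innerA_getD (ks : List String) (hnd : ks.Nodup) (g : String → Option Int)
    (d : PySem.Dict String (List (Option Int))) (k : String) :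
    (ks.foldl (fun r key => r.modify key [] (fun l => l ++ [g key])) d).getD k []
      = if k ∈ ks then d.getD k [] ++ [g k] else d.getD k [] := by
  induction ks generalizing d with
  | nil => simp
  | cons a t ih =>
    simp only [List.foldl_cons]
    rw [ih hnd.of_cons]
    by_cases hka : k = a
    · subst hka
      have hkt : k ∉ t := (List.nodup_cons.mp hnd).1
      simp [hkt, PySem.Dict.getD_modify_self]
    · have : (d.modify a [] (fun l => l ++ [g a])).getD k [] = d.getD k [] :=
        PySem.Dict.getD_modify_of_ne d [] _ hka
      simp [this, hka]

theorem pv_outerA_getD (ms : List (List (String × Int))) (ks : List String) (hnd : ks.Nodup)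
    (d : PySem.Dict String (List (Option Int))) (k : String) :
    (ms.foldl (fun r m =>
        ks.foldl (fun r key => r.modify key [] (fun l => l ++ [pvGet m key])) r) d).getD k []
      = if k ∈ ks then d.getD k [] ++ ms.map (fun m => pvGet m k) else d.getD k [] := by
  induction ms generalizing d with
  | nil => simp
  | cons m t ih =>
    simp only [List.foldl_cons]
    rw [ih]
    rw [pv_innerA_getD ks hnd]
    by_cases hk : k ∈ ks <;> simp [hk]

theorem pv_innerA_keys (ks : List String)
    (d : PySem.Dict String (List (Option Int))) (g : String → Option Int) :
    (ks.foldl (fun r key => r.modify key [] (fun l => l ++ [g key])) d).keys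
      = PySem.Set.update d.keys ks := by
  exact PySem.Dict.keys_foldl_modify ks [] (fun _ key => fun l => l ++ [g key]) d

theorem pv_outerA_keys (ms : List (List (String × Int))) (ks : List String)
    (d : PySem.Dict String (List (Option Int))) (h : ∀ x ∈ ks, x ∈ d.keys) :
    (ms.foldl (fun r m =>
        ks.foldl (fun r key => r.modify key [] (fun l => l ++ [pvGet m key])) r) d).keys
      = d.keys := by
  induction ms generalizing d with
  | nil => simp
  | cons m t ih =>
    simp only [List.foldl_cons]
    have hk1 : (ks.foldl (fun r key => r.modify key [] (fun l => l ++ [pvGet m key])) d).keys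
        = d.keys := by
      rw [pv_innerA_keys]; exact pv_update_self h
    rw [ih _ (by rw [hk1]; exact h), hk1]

theorem pv_A_eq_canon (mappings : List (List (String × Int))) :
    stack_mappings mappings = pvCanon mappings := by
  have hks : PySem.Set.ofList ((mappings.map (fun mapping => (PySem.Dict.ofList mapping).keys)).flatMap (fun s => s)) = pvKeys mappings := by
    simp [pvKeys, List.flatMap_def, Function.comp_def]
  show (mappings.foldl (fun result mapping =>
      (PySem.Set.ofList ((mappings.map (fun mapping => (PySem.Dict.ofList mapping).keys)).flatMap (fun s => s))).foldl (fun result key =>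
        result.modify key [] (fun l => l ++ [pvGet mapping key])) result)
      PySem.Dict.empty).items
    = (pvKeys mappings).map (fun k => (k, mappings.map (fun m => pvGet m k)))
  rw [hks]
  have hnd : (pvKeys mappings).Nodup := PySem.Set.nodup_ofList _
  cases mappings with
  | nil => rfl
  | cons m t =>
    have hkeysF : ((m :: t).foldl (fun result mapping =>
        (pvKeys (m :: t)).foldl (fun result key =>
          result.modify key [] (fun l => l ++ [pvGet mapping key])) result)
        PySem.Dict.empty).keys = pvKeys (m :: t) := by
      rw [List.foldl_cons]
      have h1 : ((pvKeys (m :: t)).foldl (fun result key =>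
          result.modify key [] (fun l => l ++ [pvGet m key])) PySem.Dict.empty).keys
          = pvKeys (m :: t) := by
        rw [pv_innerA_keys, PySem.Dict.keys_empty, pv_update_nil hnd]
      rw [pv_outerA_keys t _ _ (by rw [h1]; exact fun x hx => hx), h1]
    apply pv_items_char _ _ _ hkeysF hnd
    intro k hk
    have hgd : ((m :: t).foldl (fun result mapping =>
        (pvKeys (m :: t)).foldl (fun result key =>
          result.modify key [] (fun l => l ++ [pvGet mapping key])) result)
        PySem.Dict.empty).getD k []
        = (m :: t).map (fun m => pvGet m k) := by
      rw [pv_outerA_getD _ _ hnd]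
      simp [hk]
    exact (pv_get?_eq_some_getD (by rw [hkeysF]; exact hk)).trans (by rw [hgd])

theorem pv_result0_getD (ks : List String) (n : Nat)
    (d : PySem.Dict String (List (Option Int))) (k : String) :
    (ks.foldl (fun d key => d.insert key (List.replicate n none)) d).getD k []
      = if k ∈ ks then List.replicate n none else d.getD k [] := by
  induction ks generalizing d with
  | nil => simp
  | cons a t ih =>
    simp only [List.foldl_cons]
    rw [ih]
    by_cases hkt : k ∈ t
    · simp [hkt]
    · by_cases hka : k = a
      · subst hka; simp [hkt]
      · simp [hkt, hka, PySem.Dict.getD_insert]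

theorem pv_innerB_getD (its : List (String × Int)) (hnd : (its.map Prod.fst).Nodup) (i : Nat)
    (d : PySem.Dict String (List (Option Int))) (k : String) :
    (its.foldl (fun d kv => d.modify kv.1 [] (fun l => l.set i (some kv.2))) d).getD k []
      = match (PySem.Dict.mk its).get? k with
        | some v => (d.getD k []).set i (some v)
        | none => d.getD k [] := by
  induction its generalizing d with
  | nil => simp [PySem.Dict.get?]
  | cons p t ih =>
    obtain ⟨a, b⟩ := p
    simp only [List.foldl_cons]
    rw [ih (by simpa using hnd.of_cons)]
    by_cases hka : k = a
    · subst hka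
      have hkt : k ∉ t.map Prod.fst := (List.nodup_cons.mp (by simpa using hnd)).1
      have hget : (PySem.Dict.mk t).get? k = none := by
        rw [PySem.Dict.get?_eq_none_iff_not_mem_keys]
        simpa [PySem.Dict.keys] using hkt
      have hget2 : (PySem.Dict.mk ((k, b) :: t)).get? k = some b := by
        simp [PySem.Dict.get?, List.find?]
      rw [hget, hget2]
      simp [PySem.Dict.getD_modify_self]
    · have hba : (a == k) = false := beq_eq_false_iff_ne.mpr (Ne.symm hka)
      have hget : (PySem.Dict.mk ((a, b) :: t)).get? k = (PySem.Dict.mk t).get? k := by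
        simp [PySem.Dict.get?, List.find?, hba]
      rw [hget, PySem.Dict.getD_modify_of_ne d [] _ hka]

theorem pv_scatter_getD (ps : List ((List (String × Int)) × Nat))
    (d : PySem.Dict String (List (Option Int))) (k : String) :
    (ps.foldl (fun d p =>
        (PySem.Dict.ofList p.1).items.foldl (fun d kv =>
          d.modify kv.1 [] (fun l => l.set p.2 (some kv.2))) d) d).getD k []
      = ps.foldl (fun l p =>
          match pvGet p.1 k with
          | some v => l.set p.2 (some v)
          | none => l) (d.getD k []) := by
  induction ps generalizing d with
  | nil => rfl
  | cons p t ih =>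
    simp only [List.foldl_cons]
    rw [ih]
    have hnd : ((PySem.Dict.ofList p.1).items.map Prod.fst).Nodup :=
      PySem.Dict.nodup_keys_ofList p.1
    rw [pv_innerB_getD _ hnd]
    have : PySem.Dict.mk (PySem.Dict.ofList p.1).items = PySem.Dict.ofList p.1 := rfl
    rw [this]
    rfl

theorem pv_setfold (ms : List (List (String × Int))) (k : String) (pref : List (Option Int)) :
    ((ms.zipIdx pref.length).foldl (fun l p =>
        match pvGet p.1 k with
        | some v => l.set p.2 (some v)
        | none => l) (pref ++ List.replicate ms.length none))
      = pref ++ ms.map (fun m => pvGet m k) := by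
  induction ms generalizing pref with
  | nil => simp
  | cons m t ih =>
    rw [List.zipIdx_cons, List.foldl_cons]
    have hstep : (match pvGet (m, pref.length).1 k with
        | some v => (pref ++ List.replicate (m :: t).length none).set (m, pref.length).2 (some v)
        | none => pref ++ List.replicate (m :: t).length none)
        = (pref ++ [pvGet m k]) ++ List.replicate t.length none := by
      have hrep : List.replicate (m :: t).length (none : Option Int)
          = none :: List.replicate t.length none := by
        simp [List.replicate_succ]
      cases hg : pvGet m k with
      | none => simp [List.replicate_succ]
      | some v =>
        simp only [hrep, List.set_append, Nat.sub_self]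
        simp
    rw [hstep]
    have hlen : pref.length + 1 = (pref ++ [pvGet m k]).length := by simp
    rw [hlen, ih]
    simp

theorem pv_innerB_keys (its : List (String × Int)) (i : Nat)
    (d : PySem.Dict String (List (Option Int))) (h : ∀ kv ∈ its, kv.1 ∈ d.keys) :
    (its.foldl (fun d kv => d.modify kv.1 [] (fun l => l.set i (some kv.2))) d).keys
      = d.keys := by
  induction its generalizing d with
  | nil => rfl
  | cons p t ih =>
    simp only [List.foldl_cons]
    have hk1 : (d.modify p.1 [] (fun l => l.set i (some p.2))).keys = d.keys := by
      rw [PySem.Dict.keys_modify, PySem.Dict.keys_insert_of_contains]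
      exact (PySem.Dict.contains_iff_mem_keys d p.1).mpr (h p (by simp))
    rw [ih _ (by rw [hk1]; exact fun kv hkv => h kv (by simp [hkv])), hk1]

theorem pv_scatter_keys (ps : List ((List (String × Int)) × Nat))
    (d : PySem.Dict String (List (Option Int)))
    (h : ∀ p ∈ ps, ∀ kv ∈ (PySem.Dict.ofList p.1).items, kv.1 ∈ d.keys) :
    (ps.foldl (fun d p =>
        (PySem.Dict.ofList p.1).items.foldl (fun d kv =>
          d.modify kv.1 [] (fun l => l.set p.2 (some kv.2))) d) d).keys
      = d.keys := by
  induction ps generalizing d with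
  | nil => rfl
  | cons p t ih =>
    simp only [List.foldl_cons]
    have hk1 := pv_innerB_keys (PySem.Dict.ofList p.1).items p.2 d (h p (by simp))
    rw [ih _ (by rw [hk1]; exact fun q hq => h q (by simp [hq])), hk1]

theorem pv_B_eq_canon (mappings : List (List (String × Int))) :
    stack_mappings_alt mappings = pvCanon mappings := by
  show ((mappings.zipIdx).foldl (fun d p =>
      (PySem.Dict.ofList p.1).items.foldl (fun d kv =>
        d.modify kv.1 [] (fun l => l.set p.2 (some kv.2))) d)
      ((pvKeys mappings).foldl (fun d key =>
        d.insert key (List.replicate mappings.length (none : Option Int))) PySem.Dict.empty)).items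
    = (pvKeys mappings).map (fun k => (k, mappings.map (fun m => pvGet m k)))
  have hnd : (pvKeys mappings).Nodup := PySem.Set.nodup_ofList _
  have hkeys0 : ((pvKeys mappings).foldl (fun d key =>
      d.insert key (List.replicate mappings.length (none : Option Int))) PySem.Dict.empty).keys
      = pvKeys mappings := by
    rw [PySem.Dict.keys_foldl_insert, PySem.Dict.keys_empty, pv_update_nil hnd]
  have hkeysF : ((mappings.zipIdx).foldl (fun d p =>
      (PySem.Dict.ofList p.1).items.foldl (fun d kv =>
        d.modify kv.1 [] (fun l => l.set p.2 (some kv.2))) d)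
      ((pvKeys mappings).foldl (fun d key =>
        d.insert key (List.replicate mappings.length (none : Option Int))) PySem.Dict.empty)).keys
      = pvKeys mappings := by
    rw [pv_scatter_keys, hkeys0]
    intro p hp kv hkv
    rw [hkeys0]
    have hm : p.1 ∈ mappings := List.fst_mem_of_mem_zipIdx hp
    have : kv.1 ∈ (PySem.Dict.ofList p.1).keys := by
      simp only [PySem.Dict.keys]
      exact List.mem_map_of_mem hkv
    exact (PySem.Set.mem_ofList _ _).mpr (List.mem_flatMap.mpr ⟨p.1, hm, this⟩)
  apply pv_items_char _ _ _ hkeysF hnd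
  intro k hk
  have hgd : ((mappings.zipIdx).foldl (fun d p =>
      (PySem.Dict.ofList p.1).items.foldl (fun d kv =>
        d.modify kv.1 [] (fun l => l.set p.2 (some kv.2))) d)
      ((pvKeys mappings).foldl (fun d key =>
        d.insert key (List.replicate mappings.length (none : Option Int))) PySem.Dict.empty)).getD k []
      = mappings.map (fun m => pvGet m k) := by
    rw [pv_scatter_getD]
    have h0 : ((pvKeys mappings).foldl (fun d key =>
        d.insert key (List.replicate mappings.length (none : Option Int))) PySem.Dict.empty).getD k []
        = List.replicate mappings.length (none : Option Int) := by
      rw [pv_result0_getD]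
      simp [hk]
    rw [h0]
    simpa using pv_setfold mappings k []
  exact (pv_get?_eq_some_getD (by rw [hkeysF]; exact hk)).trans (by rw [hgd])

-- ===== VERDICT (by name: the statement is the Claim_ definition above) =====
theorem stack_mappings_spec : Claim_equal_stack_mappings := by
  intro mappings _
  unfold Spec_stack_mappings
  rw [pv_A_eq_canon, pv_B_eq_canon]
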